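-- pv_equiv track=rewrite | github.com/VolumeQuant/quant_py-main | backtest/fill_market_cap.py | get_nearest_shares
-- ===== SOURCE A (Python) =====
-- def get_nearest_shares(shares_timeline, target_date):
--     """target_date에 가장 가까운 상장주식수 반환"""
--     dates = sorted(shares_timeline.keys())
--     # target_date 이하 중 가장 큰 날짜
--     before = [d for d in dates if d <= target_date]
--     after = [d for d in dates if d > target_date]
--
--     if before:
--         return shares_timeline[before[-1]]
--     elif after:
--         return shares_timeline[after[0]]
--     return None
-- ===== SOURCE B (Python) =====
-- def get_nearest_shares(shares_timeline, target_date):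
--     """target_date에 가장 가까운 상장주식수 반환 (single linear pass, no sort)"""
--     best = None
--     for d in shares_timeline:
--         if d <= target_date:
--             if best is None or best > target_date or d > best:
--                 best = d
--         elif best is None or (best > target_date and d < best):
--             best = d
--     return shares_timeline[best] if best is not None else None
-- ===== Notes on version B (the rewrite author's own statement) =====
-- stated objective: faster
-- what changed: Replaced sort-then-filter-the-sorted-keys with a single linear pass that keeps one best candidate key (max key <= target, falling back to min key > target), then one dict lookup.
import Mathlib
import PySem

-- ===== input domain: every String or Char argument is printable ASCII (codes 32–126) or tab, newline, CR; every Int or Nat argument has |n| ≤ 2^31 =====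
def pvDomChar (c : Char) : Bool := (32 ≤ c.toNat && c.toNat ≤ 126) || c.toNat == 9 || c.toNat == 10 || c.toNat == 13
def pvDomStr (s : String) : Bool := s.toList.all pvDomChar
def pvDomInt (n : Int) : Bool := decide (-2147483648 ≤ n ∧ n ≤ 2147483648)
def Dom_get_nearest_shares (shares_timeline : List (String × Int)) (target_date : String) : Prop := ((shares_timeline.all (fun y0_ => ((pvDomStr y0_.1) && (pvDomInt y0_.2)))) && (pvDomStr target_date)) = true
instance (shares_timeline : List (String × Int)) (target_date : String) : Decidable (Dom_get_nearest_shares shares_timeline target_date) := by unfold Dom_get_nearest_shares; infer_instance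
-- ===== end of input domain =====

-- B replaces A's sort of all dates followed by two filter passes with a single linear
-- pass keeping one best candidate date (max date ≤ target, else min date > target); objective: faster (avoids the sort).

-- ===== PORT A =====
-- shares_timeline is a Python dict; its Lean value is the association list, read with
-- Python-dict semantics via PySem.Dict.ofList (last value per key, first-occurrence order).
def get_nearest_shares (shares_timeline : List (String × Int)) (target_date : String) : Option Int :=
  let d := PySem.Dict.ofList shares_timeline
  let dates := PySem.List.sorted d.keys (fun x => x) false
  let before := dates.filter (fun x => decide (x ≤ target_date))
  let after := dates.filter (fun x => decide (target_date < x))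
  if h : before ≠ [] then d.get? (before.getLast h)
  else if h2 : after ≠ [] then d.get? (after.head h2)
  else none

-- ===== PORT B =====
def get_nearest_shares_alt (shares_timeline : List (String × Int)) (target_date : String) : Option Int :=
  let d := PySem.Dict.ofList shares_timeline
  let best := d.keys.foldl (fun (b : Option String) k =>
    if k ≤ target_date then
      match b with
      | none => some k
      | some bb => if target_date < bb ∨ bb < k then some k else some bb
    else
      match b with
      | none => some k
      | some bb => if target_date < bb ∧ k < bb then some k else some bb) none
  match best with
  | some bb => d.get? bb
  | none => none

-- ===== PRECONDITION & SPEC =====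
def Spec_get_nearest_shares (shares_timeline : List (String × Int)) (target_date : String) (out : Option Int) : Prop := out = get_nearest_shares_alt shares_timeline target_date
instance (shares_timeline : List (String × Int)) (target_date : String) (out : Option Int) : Decidable (Spec_get_nearest_shares shares_timeline target_date out) := by unfold Spec_get_nearest_shares; infer_instance

-- ===== CLAIM (what is proved, stated in full; the proofs are below) =====
def Claim_equal_get_nearest_shares : Prop := ∀ (shares_timeline : List (String × Int)) (target_date : String), Dom_get_nearest_shares shares_timeline target_date → Spec_get_nearest_shares shares_timeline target_date (get_nearest_shares shares_timeline target_date)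

-- ===== LEMMAS AND PROOFS =====

-- B's loop body, named for the proofs (definitionally the lambda in get_nearest_shares_alt).
def bstep (target_date : String) (b : Option String) (k : String) : Option String :=
  if k ≤ target_date then
    match b with
    | none => some k
    | some bb => if target_date < bb ∨ bb < k then some k else some bb
  else
    match b with
    | none => some k
    | some bb => if target_date < bb ∧ k < bb then some k else some bb

theorem bstep_ne_none (t : String) (b : Option String) (k : String) : bstep t b k ≠ none := by
  cases b <;> simp only [bstep] <;> split_ifs <;> simp

theorem bfold_none (t : String) (ks : List String) :
    ks.foldl (bstep t) none = none ↔ ks = [] := by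
  constructor
  · intro h
    cases hks : ks.reverse with
    | nil => simpa using congrArg List.reverse hks
    | cons k l =>
      have hks' : ks = l.reverse ++ [k] := by
        have := congrArg List.reverse hks; simpa using this
      rw [hks', List.foldl_append] at h
      exact absurd h (bstep_ne_none t _ k)
  · rintro rfl; rfl

theorem bfold_spec (t : String) (ks : List String) (bb : String)
    (h : ks.foldl (bstep t) none = some bb) :
    bb ∈ ks ∧ (bb ≤ t → ∀ k ∈ ks, k ≤ t → k ≤ bb) ∧
      (¬ bb ≤ t → (∀ k ∈ ks, t < k) ∧ ∀ k ∈ ks, bb ≤ k) := by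
  induction ks using List.reverseRecOn generalizing bb with
  | nil => simp at h
  | append_singleton l k ih =>
    rw [List.foldl_append, List.foldl_cons, List.foldl_nil] at h
    cases hl : l.foldl (bstep t) none with
    | none =>
      have hlnil : l = [] := (bfold_none t l).mp hl
      subst hlnil
      rw [hl] at h
      by_cases hk : k ≤ t <;> simp [bstep, hk] at h <;> subst h <;>
        constructor <;> simp_all
    | some b0 =>
      rw [hl] at h
      obtain ⟨hb0mem, hb0le, hb0gt⟩ := ih b0 hl
      by_cases hk : k ≤ t
      · simp only [bstep, if_pos hk] at h
        by_cases hrep : t < b0 ∨ b0 < k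
        · rw [if_pos hrep] at h
          obtain rfl : k = bb := by simpa using h
          refine ⟨by simp, fun _ k' hk' hk'le => ?_, fun hnle => absurd hk hnle⟩
          rcases List.mem_append.mp hk' with hin | hin
          · rcases hrep with hgt | hlt
            · exact absurd hk'le ((hb0gt (not_le.mpr hgt)).1 k' hin).not_ge
            · by_cases hb0t : b0 ≤ t
              · exact le_trans (hb0le hb0t k' hin hk'le) (le_of_lt hlt)
              · exact absurd hk'le ((hb0gt hb0t).1 k' hin).not_ge
          · simp_all
        · rw [if_neg hrep] at h
          obtain rfl : b0 = bb := by simpa using h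
          push Not at hrep
          obtain ⟨hble, hkb⟩ := hrep
          refine ⟨by simp [hb0mem], fun hbt k' hk' hk'le => ?_, fun hnle => absurd hble (not_le.mpr (not_le.mp hnle))⟩
          rcases List.mem_append.mp hk' with hin | hin
          · exact hb0le hbt k' hin hk'le
          · have hk'k : k' = k := by simpa using hin
            subst hk'k; exact hkb
      · simp only [bstep, if_neg hk] at h
        by_cases hrep : t < b0 ∧ k < b0
        · rw [if_pos hrep] at h
          obtain rfl : k = bb := by simpa using h
          refine ⟨by simp, fun hbt => absurd hbt hk, fun _ => ⟨?_, ?_⟩⟩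
          · intro k' hk'
            rcases List.mem_append.mp hk' with hin | hin
            · exact ((hb0gt (not_le.mpr hrep.1)).1 k' hin)
            · have hk'k : k' = k := by simpa using hin
              subst hk'k; exact not_le.mp hk
          · intro k' hk'
            rcases List.mem_append.mp hk' with hin | hin
            · exact le_trans (le_of_lt hrep.2) ((hb0gt (not_le.mpr hrep.1)).2 k' hin)
            · simp_all
        · rw [if_neg hrep] at h
          obtain rfl : b0 = bb := by simpa using h
          refine ⟨by simp [hb0mem], fun hbt k' hk' hk'le => ?_, fun hnle => ⟨?_, ?_⟩⟩
          · rcases List.mem_append.mp hk' with hin | hin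
            · exact hb0le hbt k' hin hk'le
            · exact absurd ((by simpa using hin : k' = k) ▸ hk'le) hk
          · intro k' hk'
            rcases List.mem_append.mp hk' with hin | hin
            · exact (hb0gt hnle).1 k' hin
            · have hk'k : k' = k := by simpa using hin
              subst hk'k; exact not_le.mp hk
          · intro k' hk'
            rcases List.mem_append.mp hk' with hin | hin
            · exact (hb0gt hnle).2 k' hin
            · have hk'k : k' = k := by simpa using hin
              subst hk'k
              have := not_and.mp hrep (not_le.mp hnle)
              exact not_lt.mp this
  
theorem le_getLast_of_pairwise (l : List String) (hpw : l.Pairwise (· ≤ ·)) (x : String)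
    (hx : x ∈ l) (hne : l ≠ []) : x ≤ l.getLast hne := by
  have hdec := List.dropLast_append_getLast hne
  rw [← hdec] at hpw hx
  rcases List.mem_append.mp hx with hin | hin
  · exact ((List.pairwise_append.mp hpw).2.2 x hin _ (by simp))
  · simp_all
  
theorem head_le_of_pairwise (l : List String) (hpw : l.Pairwise (· ≤ ·)) (x : String)
    (hx : x ∈ l) (hne : l ≠ []) : l.head hne ≤ x := by
  cases l with
  | nil => exact absurd rfl hne
  | cons c cs =>
    rcases List.mem_cons.mp hx with rfl | hin
    · simp
    · simpa using (List.pairwise_cons.mp hpw).1 x hin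

-- ===== VERDICT (by name: the statement is the Claim_ definition above) =====
theorem get_nearest_shares_spec : Claim_equal_get_nearest_shares := by
  intro xs t _dom
  unfold Spec_get_nearest_shares get_nearest_shares get_nearest_shares_alt
  simp only []
  set d := PySem.Dict.ofList xs with hd
  set dates := PySem.List.sorted d.keys (fun x => x) false with hdates
  set before := dates.filter (fun x => decide (x ≤ t)) with hbefore
  set after := dates.filter (fun x => decide (t < x)) with hafter
  have hstep : (fun (b : Option String) k =>
      if k ≤ t then
        match b with
        | none => some k
        | some bb => if t < bb ∨ bb < k then some k else some bb
      else
        match b with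
        | none => some k
        | some bb => if t < bb ∧ k < bb then some k else some bb) = bstep t := rfl
  rw [hstep]
  have hmemd : ∀ k, k ∈ dates ↔ k ∈ d.keys := fun k => PySem.List.mem_sorted d.keys (fun x => x) false k
  have hpw : dates.Pairwise (· ≤ ·) := by
    have := PySem.List.sorted_pairwise d.keys (fun x => x)
    simpa [hdates] using this
  by_cases hb : before ≠ []
  · -- some key ≤ t exists: both return the value at the greatest key ≤ t
    rw [dif_pos hb]
    set M := before.getLast hb with hM
    have hMmem : M ∈ before := List.getLast_mem hb
    have hMfacts := List.mem_filter.mp hMmem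
    have hMdates : M ∈ dates := hMfacts.1
    have hMle : M ≤ t := of_decide_eq_true hMfacts.2
    have hne : d.keys ≠ [] := fun hnil => by
      have := (hmemd M).mp hMdates; rw [hnil] at this; simp at this
    cases hfold : d.keys.foldl (bstep t) none with
    | none => exact absurd ((bfold_none t d.keys).mp hfold) hne
    | some bb =>
      obtain ⟨hbbmem, hmax, hmin⟩ := bfold_spec t d.keys bb hfold
      have hbble : bb ≤ t := by
        by_contra hnle
        exact absurd hMle (not_le.mpr ((hmin hnle).1 M ((hmemd M).mp hMdates)))
      have hbbbefore : bb ∈ before := by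
        rw [hbefore]
        exact List.mem_filter.mpr ⟨(hmemd bb).mpr hbbmem, decide_eq_true hbble⟩
      have h1 : bb ≤ M := le_getLast_of_pairwise before (hpw.filter _) bb hbbbefore hb
      have h2 : M ≤ bb := hmax hbble M ((hmemd M).mp hMdates) hMle
      rw [le_antisymm h1 h2]
  · push Not at hb
    rw [dif_neg (by simpa using hb)]
    have hnole : ∀ k ∈ d.keys, ¬ k ≤ t := by
      intro k hk
      have hkin : k ∈ dates := (hmemd k).mpr hk
      have := List.filter_eq_nil_iff.mp hb k hkin
      simpa using this
    by_cases ha : after ≠ []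
    · -- no key ≤ t but some key > t: both return the value at the least key
      rw [dif_pos ha]
      set M := after.head ha with hM
      have hMmem : M ∈ after := List.head_mem ha
      have hMfacts := List.mem_filter.mp hMmem
      have hMdates : M ∈ dates := hMfacts.1
      have hne : d.keys ≠ [] := fun hnil => by
        have := (hmemd M).mp hMdates; rw [hnil] at this; simp at this
      cases hfold : d.keys.foldl (bstep t) none with
      | none => exact absurd ((bfold_none t d.keys).mp hfold) hne
      | some bb =>
        obtain ⟨hbbmem, _, hmin⟩ := bfold_spec t d.keys bb hfold
        have hbbgt : ¬ bb ≤ t := hnole bb hbbmem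
        have hbbafter : bb ∈ after := by
          rw [hafter]
          exact List.mem_filter.mpr ⟨(hmemd bb).mpr hbbmem, decide_eq_true (not_le.mp hbbgt)⟩
        have h1 : M ≤ bb := head_le_of_pairwise after (hpw.filter _) bb hbbafter ha
        have h2 : bb ≤ M := (hmin hbbgt).2 M ((hmemd M).mp hMdates)
        rw [le_antisymm h2 h1]
    · -- empty dict: both return none
      push Not at ha
      rw [dif_neg (by simpa using ha)]
      have hnil : d.keys = [] := by
        cases hk : d.keys with
        | nil => rfl
        | cons c cs =>
          have hc : c ∈ dates := (hmemd c).mpr (by simp [hk])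
          have h1 : ¬ c ≤ t := by
            have := List.filter_eq_nil_iff.mp hb c hc; simpa using this
          have h2 : ¬ t < c := by
            have := List.filter_eq_nil_iff.mp ha c hc; simpa using this
          exact absurd (not_le.mp h1) h2
      rw [hnil]
      rfl
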